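-- pv_equiv track=rewrite | github.com/insyhmi/lanxiol-s-mcc-2022-approach | mcc 2022 5 card shark.py | card_shark
-- ===== SOURCE A (Python) =====
-- import itertools
-- from itertools import chain
--
-- def card_shark (stack):
--     p = list(itertools.permutations(stack))
--     max_diff = -float('inf')
--     for i in p:
--         player = {
--             1 : 0,
--             2 : 0
--         }
--         all_cards = list(chain.from_iterable(i))
--         for j in enumerate(all_cards):
--             player[((j[0])%2) + 1] += j[1]
--         if (player[1] - player[2]) > max_diff:
--             max_diff = player[1] - player[2]
--     return max_diff
-- ===== SOURCE B (Python) =====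
-- def card_shark(stack):
--     # Parity analysis instead of enumerating permutations:
--     # a group starting at an even global position contributes its alternating
--     # sum s(g), at an odd position -s(g); only odd-length groups flip parity.
--     evens = []
--     odds = []
--     for g in stack:
--         s = 0
--         sign = 1
--         for x in g:
--             s += sign * x
--             sign = -sign
--         (odds if len(g) % 2 else evens).append(s)
--     if not odds:
--         return sum(evens)
--     odds.sort(reverse=True)
--     p = (len(odds) + 1) // 2
--     return sum(abs(s) for s in evens) + sum(odds[:p]) - sum(odds[p:])
-- ===== Notes on version B (the rewrite author's own statement) =====
-- stated objective: faster
-- what changed: A enumerates all n! permutations of the card groups and simulates the alternating deal for each; B computes each group's alternating sum once and uses a parity argument: even-length groups contribute the absolute value of their alternating sum, odd-length groups are sorted descending and the top half added, the bottom half subtracted.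
import Mathlib
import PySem

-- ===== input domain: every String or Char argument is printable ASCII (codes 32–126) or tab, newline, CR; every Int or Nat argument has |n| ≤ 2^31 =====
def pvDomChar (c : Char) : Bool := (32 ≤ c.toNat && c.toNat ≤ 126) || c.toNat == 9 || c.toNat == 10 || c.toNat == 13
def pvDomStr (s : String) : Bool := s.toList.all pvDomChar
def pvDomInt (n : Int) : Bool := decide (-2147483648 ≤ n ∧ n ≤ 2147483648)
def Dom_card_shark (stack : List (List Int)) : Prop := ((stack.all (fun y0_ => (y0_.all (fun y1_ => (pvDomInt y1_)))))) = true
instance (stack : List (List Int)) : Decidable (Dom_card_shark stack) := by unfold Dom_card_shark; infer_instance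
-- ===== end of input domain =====

-- B replaces A's factorial scan over all permutations by a parity analysis:
-- even-length groups contribute |alternating sum|, odd-length groups are sorted
-- and alternately signed; objective: faster (asymptotic).

-- ===== PORT A =====
def card_shark (stack : List (List Int)) : Int :=
  let p := PySem.List.permutations stack stack.length
  let r := p.foldl (fun (maxDiff : Option Int) i =>
    -- player = {1: 0, 2: 0}
    let player0 : PySem.Dict Int Int := PySem.Dict.ofList [(1, 0), (2, 0)]
    let allCards := i.flatten                      -- list(chain.from_iterable(i))
    let player := (PySem.List.enumerate allCards).foldl
      (fun d j =>
        let k := PySem.Int.mod j.1 2 + 1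
        d.insert k (d.getD k 0 + j.2)) player0
    let diff := player.getD 1 0 - player.getD 2 0
    -- max_diff = -float('inf') is modelled by none; any Int beats it
    match maxDiff with
    | none => some diff
    | some m => if diff > m then some diff else some m) none
  r.getD 0  -- r is never none: the permutations list is nonempty

-- ===== PORT B =====
def card_shark_alt (stack : List (List Int)) : Int :=
  let eoAcc := stack.foldl (fun (acc : List Int × List Int) g =>
      let s := (g.foldl (fun (p : Int × Int) x => (p.1 + p.2 * x, -p.2)) (0, 1)).1
      if g.length % 2 == 1 then (acc.1, acc.2 ++ [s]) else (acc.1 ++ [s], acc.2))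
    ([], [])
  let evens := eoAcc.1
  let odds := eoAcc.2
  if odds.isEmpty then evens.sum
  else
    let odds := PySem.List.sorted odds (fun x => x) true
    let p : Int := PySem.Int.floordiv ((odds.length : Int) + 1) 2
    (evens.map (fun s => |s|)).sum
      + (PySem.List.slice odds none (some p)).sum
      - (PySem.List.slice odds (some p) none).sum

-- ===== PRECONDITION & SPEC =====
def Spec_card_shark (stack : List (List Int)) (out : Int) : Prop := out = card_shark_alt stack
instance (stack : List (List Int)) (out : Int) : Decidable (Spec_card_shark stack out) := by unfold Spec_card_shark; infer_instance

-- ===== CLAIM (what is proved, stated in full; the proofs are below) =====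
def Claim_equal_card_shark : Prop := ∀ (stack : List (List Int)), Dom_card_shark stack → Spec_card_shark stack (card_shark stack)

-- ===== LEMMAS AND PROOFS =====

-- alternating sum  a0 - a1 + a2 - …
def asum : List Int → Int
  | [] => 0
  | a :: t => a - asum t

-- even-length group?
def eg (g : List Int) : Bool := g.length % 2 == 0

def evAbs (l : List (List Int)) : Int := ((l.filter eg).map (fun g => |asum g|)).sum
def odv (l : List (List Int)) : List Int := (l.filter (fun g => !eg g)).map asum

theorem asum_append (xs ys : List Int) :
    asum (xs ++ ys) = asum xs + (if Even xs.length then asum ys else -(asum ys)) := by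
  induction xs with
  | nil => simp [asum]
  | cons a t ih =>
    simp only [List.cons_append, asum, ih, List.length_cons, Nat.even_add_one]
    by_cases h : Even t.length <;> simp [h] <;> ring

theorem eg_even {g : List Int} : eg g = true ↔ Even g.length := by
  simp [eg, Nat.even_iff]

theorem evAbs_cons (g : List Int) (r : List (List Int)) :
    evAbs (g :: r) = (if eg g then |asum g| else 0) + evAbs r := by
  by_cases h : eg g <;> simp [evAbs, h]

theorem odv_cons (g : List Int) (r : List (List Int)) :
    odv (g :: r) = (if eg g then [] else [asum g]) ++ odv r := by
  by_cases h : eg g <;> simp [odv, h]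

-- ---- A's inner dict loop computes the alternating sum ----

theorem inner_spec (l : List Int) (n : Nat) (d : PySem.Dict Int Int) :
    (((PySem.List.enumerate l (n : Int)).foldl
        (fun d j =>
          let k := PySem.Int.mod j.1 2 + 1
          d.insert k (d.getD k 0 + j.2)) d).getD 1 0
      - ((PySem.List.enumerate l (n : Int)).foldl
        (fun d j =>
          let k := PySem.Int.mod j.1 2 + 1
          d.insert k (d.getD k 0 + j.2)) d).getD 2 0)
    = (d.getD 1 0 - d.getD 2 0) + (if Even n then asum l else -(asum l)) := by
  induction l generalizing n d with
  | nil => simp [asum, PySem.List.enumerate_nil]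
  | cons a t ih =>
    rw [PySem.List.enumerate_cons]
    simp only [List.foldl_cons]
    have hcast : (n : Int) + 1 = ((n + 1 : Nat) : Int) := by push_cast; ring
    rw [hcast, ih (n + 1)]
    have hmod : PySem.Int.mod (n : Int) 2 = ((n % 2 : Nat) : Int) := PySem.Int.mod_natCast n 2
    rcases Nat.even_or_odd n with he | ho
    · have h2 : n % 2 = 0 := Nat.even_iff.mp he
      rw [hmod, h2]
      simp [PySem.Dict.getD_insert, asum, Nat.even_add_one, he]
      ring
    · have h2 : n % 2 = 1 := Nat.odd_iff.mp ho
      rw [hmod, h2]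
      simp [PySem.Dict.getD_insert, asum, Nat.even_add_one, Nat.not_even_iff_odd.mpr ho]
      ring

def diffA (i : List (List Int)) : Int :=
  let player0 : PySem.Dict Int Int := PySem.Dict.ofList [(1, 0), (2, 0)]
  let player := (PySem.List.enumerate i.flatten).foldl
    (fun d j =>
      let k := PySem.Int.mod j.1 2 + 1
      d.insert k (d.getD k 0 + j.2)) player0
  player.getD 1 0 - player.getD 2 0

theorem diffA_eq (i : List (List Int)) : diffA i = asum i.flatten := by
  unfold diffA
  have h0 : ((0 : Nat) : Int) = (0 : Int) := rfl
  have := inner_spec i.flatten 0 (PySem.Dict.ofList [(1, 0), (2, 0)])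
  rw [h0] at this
  simp only [this]
  norm_num
  rfl

-- ---- the outer fold is a maximum ----

def mstep (m : Option Int) (v : Int) : Option Int :=
  match m with
  | none => some v
  | some m => if v > m then some v else some m

theorem foldmax_some (l : List Int) (m0 : Int) :
    ∃ m, l.foldl mstep (some m0) = some m ∧ (m = m0 ∨ m ∈ l) ∧ m0 ≤ m ∧ ∀ x ∈ l, x ≤ m := by
  induction l generalizing m0 with
  | nil => exact ⟨m0, rfl, Or.inl rfl, le_refl _, by simp⟩
  | cons a t ih =>
    simp only [List.foldl_cons, mstep]
    by_cases h : a > m0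
    · simp only [if_pos h]
      obtain ⟨m, hm, hmem, hle, hall⟩ := ih a
      refine ⟨m, hm, Or.inr ?_, le_trans (le_of_lt h) hle, ?_⟩
      · rcases hmem with h' | h' <;> simp [h']
      · intro x hx
        rcases List.mem_cons.mp hx with rfl | hx'
        · exact hle
        · exact hall x hx'
    · simp only [if_neg h]
      obtain ⟨m, hm, hmem, hle, hall⟩ := ih m0
      refine ⟨m, hm, ?_, hle, ?_⟩
      · rcases hmem with h' | h' <;> simp [h']
      · intro x hx
        rcases List.mem_cons.mp hx with rfl | hx'
        · exact le_trans (le_of_not_gt h) hle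
        · exact hall x hx'

theorem foldmax_none (l : List Int) (h : l ≠ []) :
    ∃ m, l.foldl mstep none = some m ∧ m ∈ l ∧ ∀ x ∈ l, x ≤ m := by
  cases l with
  | nil => exact absurd rfl h
  | cons a t =>
    simp only [List.foldl_cons, mstep]
    obtain ⟨m, hm, hmem, hle, hall⟩ := foldmax_some t a
    refine ⟨m, hm, ?_, ?_⟩
    · rcases hmem with h' | h' <;> simp [h']
    · intro x hx
      rcases List.mem_cons.mp hx with rfl | hx'
      · exact hle
      · exact hall x hx'

-- ---- permutations: converse membership ----

theorem subperm_cons_elim {α : Type} {u d : List α} {a : α} (h : u.Subperm (a :: d)) :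
    u.Subperm d ∨ ∃ u', u.Perm (a :: u') ∧ u'.Subperm d := by
  obtain ⟨w, hw, hsub⟩ := h
  rcases List.sublist_cons_iff.mp hsub with h1 | ⟨w', rfl, h2⟩
  · exact Or.inl ⟨w, hw, h1⟩
  · exact Or.inr ⟨w', hw.symm, (List.Perm.refl w').subperm.trans h2.subperm⟩

theorem permutations_succ {α : Type} (xs : List α) (r : Nat) :
    PySem.List.permutations xs (r+1) =
    (List.range xs.length).flatMap (fun i =>
      match xs[i]? with
      | none => []
      | some a => (PySem.List.permutations (xs.eraseIdx i) r).map (fun p => a :: p)) := by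
  rw [PySem.List.permutations]
  rfl

theorem mem_permutations_of_perm {α : Type} {p xs : List α} (h : p.Perm xs) :
    p ∈ PySem.List.permutations xs xs.length := by
  induction p generalizing xs with
  | nil =>
    have : xs = [] := (List.Perm.nil_eq h).symm
    subst this; simp [PySem.List.permutations_zero]
  | cons a p' ih =>
    have ha : a ∈ xs := h.mem_iff.mp (by simp)
    obtain ⟨i, hi, hxi⟩ := List.mem_iff_getElem.mp ha
    have hlen : xs.length = (xs.length - 1) + 1 := by
      cases xs with | nil => simp at ha | cons b t => simp
    rw [hlen, permutations_succ]
    apply List.mem_flatMap.mpr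
    refine ⟨i, by simp [List.mem_range]; omega, ?_⟩
    have hget : xs[i]? = some a := by rw [List.getElem?_eq_getElem hi, hxi]
    rw [hget]
    simp only
    apply List.mem_map.mpr
    refine ⟨p', ?_, rfl⟩
    have hxsplit : xs.Perm (a :: xs.eraseIdx i) := by
      have := (List.getElem_cons_eraseIdx_perm hi).symm
      rwa [hxi] at this
    have hp' : p'.Perm (xs.eraseIdx i) := (List.perm_cons a).mp (h.trans hxsplit)
    have hlen2 : (xs.eraseIdx i).length = xs.length - 1 := by
      rw [List.length_eraseIdx_of_lt hi]
    rw [← hlen2] at *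
    exact ih hp'

theorem card_shark_eq_max (stack : List (List Int)) :
    ∃ m, card_shark stack = m ∧
      (∃ q ∈ PySem.List.permutations stack stack.length, m = asum q.flatten) ∧
      (∀ q ∈ PySem.List.permutations stack stack.length, asum q.flatten ≤ m) := by
  unfold card_shark
  simp only
  have hfold : ∀ (p : List (List (List Int))) (acc : Option Int),
      p.foldl (fun (maxDiff : Option Int) i =>
        let player0 : PySem.Dict Int Int := PySem.Dict.ofList [(1, 0), (2, 0)]
        let allCards := i.flatten
        let player := (PySem.List.enumerate allCards).foldl
          (fun d j =>
            let k := PySem.Int.mod j.1 2 + 1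
            d.insert k (d.getD k 0 + j.2)) player0
        let diff := player.getD 1 0 - player.getD 2 0
        match maxDiff with
        | none => some diff
        | some m => if diff > m then some diff else some m) acc
      = (p.map diffA).foldl mstep acc := by
    intro p acc
    rw [List.foldl_map]
    rfl
  rw [hfold]
  have hne : PySem.List.permutations stack stack.length ≠ [] := by
    intro hnil
    have := mem_permutations_of_perm (List.Perm.refl stack)
    rw [hnil] at this
    exact absurd this (List.not_mem_nil)
  have hne2 : (PySem.List.permutations stack stack.length).map diffA ≠ [] := by
    simpa using hne
  obtain ⟨m, hm, hmem, hall⟩ := foldmax_none _ hne2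
  refine ⟨m, by rw [hm]; rfl, ?_, ?_⟩
  · obtain ⟨q, hq, hdq⟩ := List.mem_map.mp hmem
    exact ⟨q, hq, by rw [← hdq, diffA_eq]⟩
  · intro q hq
    rw [← diffA_eq]
    exact hall _ (List.mem_map.mpr ⟨q, hq, rfl⟩)

-- ---- upper/lower bound for any arrangement ----

theorem vbound (l : List (List Int)) :
    -(evAbs l) + asum (odv l) ≤ asum l.flatten ∧ asum l.flatten ≤ evAbs l + asum (odv l) := by
  induction l with
  | nil => simp [evAbs, odv, asum]
  | cons g r ih =>
    obtain ⟨ih1, ih2⟩ := ih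
    rw [List.flatten_cons, asum_append, evAbs_cons, odv_cons]
    have habs1 : asum g ≤ |asum g| := le_abs_self _
    have habs2 : -|asum g| ≤ asum g := neg_abs_le _
    by_cases hg : eg g = true
    · have hev : Even g.length := eg_even.mp hg
      simp only [hg, if_pos, List.nil_append, hev]
      constructor <;> linarith
    · have hev : ¬ Even g.length := fun h => hg (eg_even.mpr h)
      simp only [hg, if_false, if_neg hev, List.cons_append, List.nil_append, Bool.false_eq_true,
        asum]
      constructor <;> linarith

-- ---- even/odd position split ----

def eo : List Int → List Int × List Int
  | [] => ([], [])
  | a :: t => (a :: (eo t).2, (eo t).1)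

theorem asum_eo (l : List Int) : asum l = (eo l).1.sum - (eo l).2.sum := by
  induction l with
  | nil => simp [eo, asum]
  | cons a t ih => simp [eo, asum, ih]; ring

theorem eo_perm (l : List Int) : ((eo l).1 ++ (eo l).2).Perm l := by
  induction l with
  | nil => simp [eo]
  | cons a t ih =>
    simp only [eo, List.cons_append]
    exact (List.Perm.cons a ((List.perm_append_comm).trans ih))

theorem eo_lengths (l : List Int) :
    (eo l).1.length = (l.length + 1) / 2 ∧ (eo l).2.length = l.length / 2 := by
  induction l with
  | nil => simp [eo]
  | cons a t ih => simp [eo, ih.1, ih.2]; omega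

-- ---- sorted-prefix bound ----

theorem sum_subperm_le_take (d : List Int) (hd : d.Pairwise (fun a b => b ≤ a)) :
    ∀ u : List Int, u.Subperm d → u.sum ≤ (d.take u.length).sum := by
  induction d with
  | nil => intro u hu; simp [List.subperm_nil.mp hu]
  | cons a d' ih =>
    intro u hu
    rcases subperm_cons_elim hu with h1 | ⟨u', hperm, h2⟩
    · have hle := ih (List.Pairwise.of_cons hd) u h1
      refine le_trans hle ?_
      cases hn : u.length with
      | zero => simp
      | succ n =>
        have hnlen : n + 1 ≤ d'.length := by
          have := h1.length_le; omega
        rw [List.take_succ_cons]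
        have hsplit : d'.take (n+1) = d'.take n ++ [d'[n]] :=
          List.take_succ_eq_append_getElem (by omega)
        rw [hsplit, List.sum_append]
        have hmem : d'[n] ∈ d' := List.getElem_mem _
        have hle2 : d'[n] ≤ a := (List.pairwise_cons.mp hd).1 _ hmem
        simp only [List.sum_cons, List.sum_nil]
        linarith
    · rw [hperm.sum_eq, hperm.length_eq]
      simp only [List.length_cons, List.take_succ_cons, List.sum_cons]
      have := ih (List.Pairwise.of_cons hd) u' h2
      linarith

theorem asum_le_sorted (t d : List Int) (hp : t.Perm d) (hd : d.Pairwise (fun a b => b ≤ a)) :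
    asum t ≤ (d.take ((t.length + 1) / 2)).sum - (d.drop ((t.length + 1) / 2)).sum := by
  have hsub : (eo t).1.Subperm d := by
    have h1 : (eo t).1.Sublist ((eo t).1 ++ (eo t).2) := List.sublist_append_left _ _
    exact (h1.subperm.trans (eo_perm t).subperm).trans hp.subperm
  have hK := sum_subperm_le_take d hd (eo t).1 hsub
  rw [(eo_lengths t).1] at hK
  have hsum : (eo t).1.sum + (eo t).2.sum = d.sum := by
    have := (eo_perm t).trans hp
    have h2 := this.sum_eq
    rwa [List.sum_append] at h2
  have hsplit : (d.take ((t.length + 1) / 2)).sum + (d.drop ((t.length + 1) / 2)).sum = d.sum := by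
    rw [← List.sum_append, List.take_append_drop]
  rw [asum_eo]
  linarith

-- all groups even: flatten alternating sum is the plain sum of group sums
theorem asum_flatten_even (l : List (List Int)) (h : ∀ g ∈ l, eg g = true) :
    asum l.flatten = (l.map asum).sum ∧ Even l.flatten.length := by
  induction l with
  | nil => simp [asum]
  | cons g r ih =>
    have hg := eg_even.mp (h g (by simp))
    obtain ⟨ih1, ih2⟩ := ih (fun g hg => h g (by simp [hg]))
    rw [List.flatten_cons, asum_append]
    refine ⟨by simp [hg, ih1], ?_⟩
    simp only [List.length_append]
    exact hg.add ih2

theorem asum_flatten_odd (l : List (List Int)) (h : ∀ g ∈ l, eg g = false) :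
    asum l.flatten = asum (l.map asum) := by
  induction l with
  | nil => simp
  | cons g r ih =>
    have hg : ¬ Even g.length := by
      intro he
      have := eg_even.mpr he
      rw [h g (by simp)] at this
      exact Bool.false_ne_true this
    rw [List.flatten_cons, asum_append, if_neg hg]
    simp only [List.map_cons, asum]
    rw [ih (fun g hg' => h g (by simp [hg']))]
    ring

-- |·| sum splits into nonnegative minus negative parts
theorem absSplit (E : List (List Int)) :
    (E.map (fun g => |asum g|)).sum
      = ((E.filter (fun g => decide (0 ≤ asum g))).map asum).sum
        - ((E.filter (fun g => !decide (0 ≤ asum g))).map asum).sum := by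
  induction E with
  | nil => simp
  | cons g r ih =>
    by_cases h : 0 ≤ asum g
    · simp [h, ih, abs_of_nonneg h]
      ring
    · simp [h, ih, abs_of_neg (lt_of_not_ge h)]
      ring

-- perm transports
theorem odv_perm {q l : List (List Int)} (h : q.Perm l) : (odv q).Perm (odv l) :=
  (h.filter _).map _
theorem evAbs_perm {q l : List (List Int)} (h : q.Perm l) : evAbs q = evAbs l :=
  ((h.filter _).map _).sum_eq

-- B inner loop
theorem binner (g : List Int) : ∀ s0 sg : Int,
    g.foldl (fun (p : Int × Int) x => (p.1 + p.2 * x, -p.2)) (s0, sg)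
      = (s0 + sg * asum g, if Even g.length then sg else -sg) := by
  induction g with
  | nil => intro s0 sg; simp [asum]
  | cons a t ih =>
    intro s0 sg
    simp only [List.foldl_cons, ih, asum, List.length_cons, Nat.even_add_one]
    by_cases h : Even t.length <;> simp [h, Prod.ext_iff] <;> ring

theorem odd_cond (g : List Int) : (g.length % 2 == 1) = !eg g := by
  rcases Nat.mod_two_eq_zero_or_one g.length with h | h <;> simp [eg, h]

-- B outer fold
theorem bfold (l : List (List Int)) : ∀ e0 o0 : List Int,
    l.foldl (fun (acc : List Int × List Int) g =>
      let s := (g.foldl (fun (p : Int × Int) x => (p.1 + p.2 * x, -p.2)) (0, 1)).1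
      if g.length % 2 == 1 then (acc.1, acc.2 ++ [s]) else (acc.1 ++ [s], acc.2)) (e0, o0)
    = (e0 ++ (l.filter eg).map asum, o0 ++ (l.filter (fun g => !eg g)).map asum) := by
  induction l with
  | nil => intro e0 o0; simp
  | cons g r ih =>
    intro e0 o0
    rw [List.foldl_cons]
    have hs : (g.foldl (fun (p : Int × Int) x => (p.1 + p.2 * x, -p.2)) (0, 1)).1 = asum g := by
      rw [binner]; simp
    by_cases h : eg g
    · have hc : (g.length % 2 == 1) = false := by rw [odd_cond, h]; rfl
      simp only [hs, hc, Bool.false_eq_true, if_false]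
      rw [ih]
      simp [h]
    · have hc : (g.length % 2 == 1) = true := by
        rw [odd_cond]; simp [h]
      simp only [hs, hc, if_true]
      rw [ih]
      simp [h]

-- mapping the key out of a descending sort
theorem map_sorted_eq (ods : List (List Int)) :
    (PySem.List.sorted ods asum true).map asum
      = PySem.List.sorted (ods.map asum) (fun x => x) true := by
  apply List.Perm.eq_of_pairwise (le := fun a b : Int => b ≤ a)
  · exact fun a b _ _ h1 h2 => le_antisymm h2 h1
  · exact List.Pairwise.map asum (fun a b h => h) (PySem.List.sorted_pairwise_rev ods asum)
  · exact PySem.List.sorted_pairwise_rev (ods.map asum) (fun x => x)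
  · exact ((PySem.List.sorted_perm ods asum true).map asum).trans
      ((PySem.List.sorted_perm (ods.map asum) (fun x => x) true).symm)

def itl : List Int → List Int → List Int
  | [], ys => ys
  | x :: xs, ys => x :: itl ys xs
termination_by xs ys => xs.length + ys.length

theorem asum_itl (xs ys : List Int) (h1 : ys.length ≤ xs.length) (h2 : xs.length ≤ ys.length + 1) :
    asum (itl xs ys) = xs.sum - ys.sum := by
  fun_induction itl with
  | case1 ys =>
    have : ys = [] := List.length_eq_zero_iff.mp (by simpa using h1)
    simp [this, asum]
  | case2 x xs ys ih =>
    simp only [asum, List.sum_cons]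
    rw [ih (by simpa using h2) (by simp at h1 ⊢; omega)]
    ring

-- group interleave (same shape, over lists of groups is not needed: we interleave groups directly)
def itlG : List (List Int) → List (List Int) → List (List Int)
  | [], ys => ys
  | x :: xs, ys => x :: itlG ys xs
termination_by xs ys => xs.length + ys.length

theorem itlG_perm (xs ys : List (List Int)) : (itlG xs ys).Perm (xs ++ ys) := by
  fun_induction itlG with
  | case1 ys => simp
  | case2 x xs ys ih =>
    simp only [List.cons_append]
    exact (ih.trans List.perm_append_comm).cons x

theorem map_itlG (f : List Int → Int) (xs ys : List (List Int)) :
    (itlG xs ys).map f = itl (xs.map f) (ys.map f) := by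
  fun_induction itlG with
  | case1 ys => simp [itl]
  | case2 x xs ys ih => simp [itl, ih]

theorem mem_itlG {g : List Int} {xs ys : List (List Int)} (h : g ∈ itlG xs ys) :
    g ∈ xs ∨ g ∈ ys := by
  have := (itlG_perm xs ys).mem_iff.mp h
  simpa using this

theorem exists_perm_max (l : List (List Int)) (hodd : l.filter (fun g => !eg g) ≠ []) :
    ∃ q : List (List Int), q.Perm l ∧
      asum q.flatten = evAbs l
        + ((PySem.List.sorted (odv l) (fun x => x) true).take (((odv l).length + 1) / 2)).sum
        - ((PySem.List.sorted (odv l) (fun x => x) true).drop (((odv l).length + 1) / 2)).sum := by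
  classical
  set ods := l.filter (fun g => !eg g) with hods
  set evs := l.filter eg with hevs
  set P := evs.filter (fun g => decide (0 ≤ asum g)) with hP
  set N := evs.filter (fun g => !decide (0 ≤ asum g)) with hN
  set og := PySem.List.sorted ods asum true with hog
  set k := ods.length with hk
  set p := (k + 1) / 2 with hp
  have hoglen : og.length = k := by rw [hog, PySem.List.length_sorted]
  have hkpos : 1 ≤ k := List.length_pos_iff.mpr hodd
  have hp1 : 1 ≤ p := by omega
  have hpk : p ≤ k := by omega
  -- og.take p is nonempty
  obtain ⟨g0, tp, htake⟩ : ∃ g0 tp, og.take p = g0 :: tp := by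
    cases hogc : og.take p with
    | nil =>
      exfalso
      have : (og.take p).length = min p og.length := List.length_take
      rw [hogc] at this
      simp at this
      omega
    | cons g0 tp => exact ⟨g0, tp, rfl⟩
  set X := itlG (og.drop p) tp with hX
  refine ⟨P ++ g0 :: (N ++ X), ?_, ?_⟩
  · -- permutation
    have h1 : (g0 :: (N ++ X)).Perm (N ++ (g0 :: X)) := List.perm_middle.symm
    have h2 : (g0 :: X).Perm og := by
      have heq : itlG (g0 :: tp) (og.drop p) = g0 :: itlG (og.drop p) tp := by
        rw [itlG]
      have : g0 :: X = itlG (og.take p) (og.drop p) := by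
        rw [htake, heq, hX]
      rw [this]
      exact (itlG_perm _ _).trans (by rw [List.take_append_drop])
    have h3 : (P ++ g0 :: (N ++ X)).Perm (P ++ (N ++ og)) :=
      List.Perm.append_left P (h1.trans (List.Perm.append_left N h2))
    have h4 : og.Perm ods := PySem.List.sorted_perm ods asum true
    have h5 : (P ++ N).Perm evs := List.filter_append_perm _ evs
    have h6 : (evs ++ ods).Perm l := List.filter_append_perm eg l
    have h7 : ((P ++ N) ++ og).Perm (evs ++ ods) := List.Perm.append h5 h4
    have h8 : P ++ (N ++ og) = (P ++ N) ++ og := (List.append_assoc _ _ _).symm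
    exact h3.trans (h8 ▸ (h7.trans h6))
  · -- value
    have hPe : ∀ g ∈ P, eg g = true := by
      intro g hg
      exact (List.mem_filter.mp (List.mem_filter.mp hg).1).2
    have hNe : ∀ g ∈ N, eg g = true := by
      intro g hg
      exact (List.mem_filter.mp (List.mem_filter.mp hg).1).2
    have hPf := asum_flatten_even P hPe
    have hNf := asum_flatten_even N hNe
    have hogsub : ∀ g ∈ og, eg g = false := by
      intro g hg
      have hmem : g ∈ ods := (PySem.List.sorted_perm ods asum true).subset hg
      have := (List.mem_filter.mp hmem).2
      simpa using this
    have hg0og : g0 ∈ og := List.take_subset p og (htake ▸ List.mem_cons_self)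
    have hg0odd : eg g0 = false := hogsub g0 hg0og
    have hg0ev : ¬ Even g0.length := by
      intro h
      rw [eg_even.mpr h] at hg0odd
      exact absurd hg0odd (by simp)
    have hXodd : ∀ g ∈ X, eg g = false := by
      intro g hg
      rcases mem_itlG hg with h | h
      · exact hogsub g (List.drop_subset p og h)
      · exact hogsub g (List.take_subset p og (htake ▸ List.mem_cons_of_mem g0 h))
    have hXf := asum_flatten_odd X hXodd
    set d := og.map asum with hd
    have hdS : d = PySem.List.sorted (odv l) (fun x => x) true := by
      rw [hd, hog, map_sorted_eq]
      rfl
    have hXmap : X.map asum = itl (d.drop p) (tp.map asum) := by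
      rw [hX, map_itlG, hd, List.map_drop]
    have htplen : tp.length = p - 1 := by
      have h1 := congrArg List.length htake
      rw [List.length_take] at h1
      simp at h1
      omega
    have hdlen : d.length = k := by rw [hd, List.length_map, hoglen]
    have hdtake : d.take p = asum g0 :: tp.map asum := by
      rw [hd, ← List.map_take, htake, List.map_cons]
    have hXval : asum (X.map asum) = (d.drop p).sum - (tp.map asum).sum := by
      rw [hXmap]
      apply asum_itl
      · rw [List.length_drop, hdlen, List.length_map, htplen]; omega
      · rw [List.length_drop, hdlen, List.length_map, htplen]; omega
    have hflat : (P ++ g0 :: (N ++ X)).flatten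
        = P.flatten ++ (g0 ++ (N.flatten ++ X.flatten)) := by
      simp
    rw [hflat, asum_append, if_pos hPf.2, asum_append, if_neg hg0ev, asum_append, if_pos hNf.2]
    rw [hPf.1, hNf.1, hXf, hXval]
    -- evAbs l = P-sum minus N-sum
    have hev : evAbs l = (P.map asum).sum - (N.map asum).sum := by
      rw [evAbs, absSplit]
    have hodvl : odv l = ods.map asum := by rw [odv, hods]
    have hodvlen : (odv l).length = k := by rw [hodvl, List.length_map, hk]
    rw [← hdS, hodvlen, ← hp, hev, hdtake]
    simp only [List.sum_cons]
    ring

-- ---- B characterization ----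

theorem bchar (stack : List (List Int)) :
    card_shark_alt stack =
      if (odv stack).isEmpty then ((stack.filter eg).map asum).sum
      else evAbs stack
        + ((PySem.List.sorted (odv stack) (fun x => x) true).take (((odv stack).length + 1) / 2)).sum
        - ((PySem.List.sorted (odv stack) (fun x => x) true).drop (((odv stack).length + 1) / 2)).sum := by
  unfold card_shark_alt
  rw [bfold stack [] []]
  simp only [List.nil_append]
  have hodv : (stack.filter (fun g => !eg g)).map asum = odv stack := rfl
  rw [hodv]
  by_cases h : (odv stack).isEmpty
  · rw [if_pos h, if_pos h]
  · rw [if_neg h, if_neg h]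
    have hlen : (PySem.List.sorted (odv stack) (fun x => x) true).length = (odv stack).length :=
      PySem.List.length_sorted _ _ _
    set S := PySem.List.sorted (odv stack) (fun x => x) true with hS
    set n := (odv stack).length with hn
    have hcast : ((S.length : Int) + 1) = (((n + 1 : Nat)) : Int) := by
      rw [hlen]; push_cast; ring
    have hfd : PySem.Int.floordiv ((S.length : Int) + 1) 2
        = (((n + 1) / 2 : Nat) : Int) := by
      rw [hcast]
      exact_mod_cast PySem.Int.floordiv_natCast (n + 1) 2
    rw [hfd, PySem.List.slice_to_natCast, PySem.List.slice_from_natCast]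
    have hmm : ((stack.filter eg).map asum).map (fun s => |s|)
        = (stack.filter eg).map (fun g => |asum g|) := by
      rw [List.map_map]; rfl
    rw [hmm]
    rfl

-- ===== VERDICT (by name: the statement is the Claim_ definition above) =====
theorem card_shark_spec : Claim_equal_card_shark := by
  unfold Claim_equal_card_shark Spec_card_shark
  intro stack _
  obtain ⟨m, hcs, ⟨q0, hq0mem, hq0val⟩, hub⟩ := card_shark_eq_max stack
  have hq0perm : q0.Perm stack := PySem.List.perm_of_mem_permutations hq0mem
  rw [hcs, bchar]
  by_cases hO : odv stack = []
  · -- no odd-length groups: every arrangement has the same value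
    rw [if_pos (by simp [hO])]
    have hallev : ∀ g ∈ stack, eg g = true := by
      intro g hg
      have h1 : stack.filter (fun g => !eg g) = [] := by
        have := congrArg List.length (show odv stack = [] from hO)
        simp only [odv, List.length_map, List.length_nil] at this
        exact List.length_eq_zero_iff.mp this
      by_contra hne
      have : g ∈ stack.filter (fun g => !eg g) :=
        List.mem_filter.mpr ⟨hg, by simp [Bool.eq_false_iff.mpr hne]⟩
      rw [h1] at this
      exact absurd this (List.not_mem_nil)
    have hq0ev : ∀ g ∈ q0, eg g = true := fun g hg => hallev g (hq0perm.subset hg)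
    rw [hq0val, (asum_flatten_even q0 hq0ev).1]
    have hfe : stack.filter eg = stack := List.filter_eq_self.mpr (fun g hg => hallev g hg)
    rw [hfe, (hq0perm.map asum).sum_eq]
  · rw [if_neg (by simp [hO])]
    have hfilter_ne : stack.filter (fun g => !eg g) ≠ [] := by
      intro h
      exact hO (by simp [odv, h])
    set S := PySem.List.sorted (odv stack) (fun x => x) true with hS
    set p := ((odv stack).length + 1) / 2 with hp
    have hSperm : S.Perm (odv stack) := PySem.List.sorted_perm _ _ _
    have hSpw : S.Pairwise (fun a b => b ≤ a) :=
      PySem.List.sorted_pairwise_rev (odv stack) (fun x => x)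
    -- upper bound: the best permutation is at most B's value
    have hup : m ≤ evAbs stack + (S.take p).sum - (S.drop p).sum := by
      have hv := (vbound q0).2
      have he : evAbs q0 = evAbs stack := evAbs_perm hq0perm
      have hlq : (odv q0).length = (odv stack).length := (odv_perm hq0perm).length_eq
      have ht := asum_le_sorted (odv q0) S ((odv_perm hq0perm).trans hSperm.symm) hSpw
      rw [hlq] at ht
      rw [hq0val]
      rw [← hp] at ht
      linarith
    -- achievability: B's value is attained by some permutation
    have hlow : evAbs stack + (S.take p).sum - (S.drop p).sum ≤ m := by
      obtain ⟨q, hqperm, hqval⟩ := exists_perm_max stack hfilter_ne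
      have := hub q (mem_permutations_of_perm hqperm)
      rw [hqval] at this
      rw [← hS, ← hp] at this
      exact this
    omega
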